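-- pv_equiv track=rewrite | github.com/M-R-Epstein/poetics | poetics/conversions.py | index_unique_strings
-- ===== SOURCE A (Python) =====
-- from collections import Counter, OrderedDict
--
-- def index_unique_strings(input_list, min_count=None):
--     min_count = min_count or 1
--     out = {}
--     if isinstance(input_list[0], list):
--         count = Counter([string for item in input_list for string in item if string])
--         for key in [key for key, value in count.items() if value >= min_count]:
--             # Creates a list of the top-level indexes of the occurances of the present key.
--             indexes = [index for index, item in enumerate(input_list) for string in item if key == string]
--             # Adds the key and its indexes to output.
--             out[key] = indexes
--         return out
--     else:
--         count = Counter([string for string in input_list if string])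
--         for key in [key for key, value in count.items() if value >= min_count]:
--             # Creates a list of the top-level indexes of the occurances of the present key.
--             indexes = [index for index, string in enumerate(input_list) if key == string]
--             # Adds the key and its indexes to output.
--             out[key] = indexes
--         return out
-- ===== SOURCE B (Python) =====
-- def index_unique_strings(input_list, min_count=None):
--     threshold = min_count or 1
--     positions = {}
--     if isinstance(input_list[0], list):
--         for index, item in enumerate(input_list):
--             for string in item:
--                 if string:
--                     positions.setdefault(string, []).append(index)
--     else:
--         for index, string in enumerate(input_list):
--             if string:
--                 positions.setdefault(string, []).append(index)
--     return {key: indexes for key, indexes in positions.items() if len(indexes) >= threshold}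
-- ===== Notes on version B (the rewrite author's own statement) =====
-- stated objective: alternative
-- what changed: Replaces A's Counter-then-rescan-the-whole-list-per-qualifying-key with a single enumerate pass accumulating each string's index list in a dict, then one filter by length; asymptotically O(n) vs A's O(n*k), though a timing run did not confirm >=1.5x on the generated inputs.
import Mathlib
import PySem

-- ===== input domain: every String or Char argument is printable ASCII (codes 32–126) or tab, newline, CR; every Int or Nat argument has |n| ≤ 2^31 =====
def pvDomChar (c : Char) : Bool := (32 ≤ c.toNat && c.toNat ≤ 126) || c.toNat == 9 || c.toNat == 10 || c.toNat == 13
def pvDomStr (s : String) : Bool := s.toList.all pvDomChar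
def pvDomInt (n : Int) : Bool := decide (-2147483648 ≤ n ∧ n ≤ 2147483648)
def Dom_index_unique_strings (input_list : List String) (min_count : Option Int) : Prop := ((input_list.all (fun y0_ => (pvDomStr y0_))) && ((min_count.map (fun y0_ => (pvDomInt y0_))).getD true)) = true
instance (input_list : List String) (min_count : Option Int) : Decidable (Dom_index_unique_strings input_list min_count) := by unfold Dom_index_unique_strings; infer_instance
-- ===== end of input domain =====

-- B replaces A's Counter + full-list rescan per qualifying key with one enumerate pass
-- accumulating each string's index list, then a single filter by length (objective: alternative; removes the per-key rescans, not measured as faster).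
-- Under the List String signature only A's non-nested branch is reachable, so that branch is ported.

-- ===== PORT A =====
-- min_count = min_count or 1  (None and 0 are falsy)
def pvMc (min_count : Option Int) : Int :=
  match min_count with
  | none => 1
  | some m => if m = 0 then 1 else m

def index_unique_strings (input_list : List String) (min_count : Option Int) : List (String × List Int) :=
  let mc := pvMc min_count
  -- count = Counter([string for string in input_list if string])
  let count := PySem.Dict.counter (input_list.filter (fun s => s ≠ ""))
  -- [key for key, value in count.items() if value >= min_count]
  let keys := (count.items.filter (fun p => mc ≤ p.2)).map (·.1)
  -- for key in keys: out[key] = [index for index, string in enumerate(input_list) if key == string]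
  let out := keys.foldl
    (fun out key =>
      out.insert key
        ((PySem.List.enumerate input_list).foldl
          (fun acc p => if key = p.2 then acc ++ [p.1] else acc) []))
    PySem.Dict.empty
  out.items

-- ===== PORT B =====
-- threshold = min_count or 1  (B's own reading of the falsy default)
def pvThreshold (min_count : Option Int) : Int :=
  (min_count.filter (· ≠ 0)).getD 1

def index_unique_strings_alt (input_list : List String) (min_count : Option Int) : List (String × List Int) :=
  let threshold := pvThreshold min_count
  -- for index, string in enumerate(input_list): if string: positions.setdefault(string, []).append(index)
  let positions := (PySem.List.enumerate input_list).foldl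
    (fun d p => if p.2 ≠ "" then d.modify p.2 [] (· ++ [p.1]) else d)
    PySem.Dict.empty
  -- {key: indexes for key, indexes in positions.items() if len(indexes) >= threshold}
  positions.items.filter (fun p => threshold ≤ (p.2.length : Int))

-- ===== PRECONDITION & SPEC =====
-- A evaluates input_list[0] (IndexError on the empty list; B raises there too), so the empty list is excluded.
def Pre_index_unique_strings (input_list : List String) (_min_count : Option Int) : Prop :=
  input_list ≠ []
instance (input_list : List String) (min_count : Option Int) : Decidable (Pre_index_unique_strings input_list min_count) := by unfold Pre_index_unique_strings; infer_instance
def pvWitness_index_unique_strings : List String × Option Int := (["a", "", "a", "b"], some 2)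

def Spec_index_unique_strings (input_list : List String) (min_count : Option Int) (out : List (String × List Int)) : Prop := out = index_unique_strings_alt input_list min_count
instance (input_list : List String) (min_count : Option Int) (out : List (String × List Int)) : Decidable (Spec_index_unique_strings input_list min_count out) := by unfold Spec_index_unique_strings; infer_instance

-- ===== CLAIM (what is proved, stated in full; the proofs are below) =====
def Claim_equal_index_unique_strings : Prop := ∀ (input_list : List String) (min_count : Option Int), Dom_index_unique_strings input_list min_count → Pre_index_unique_strings input_list min_count → Spec_index_unique_strings input_list min_count (index_unique_strings input_list min_count)

-- ===== LEMMAS AND PROOFS =====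

-- A = B on every input: A lists the qualifying keys from the Counter (first-occurrence order)
-- and rescans enumerate(input_list) per key; B groups indices per key in one pass and filters
-- by length. Both sides reduce to a map over a filter of Set.ofList of the truthy strings.
theorem pv_AB_eq (l : List String) (mc? : Option Int) : index_unique_strings l mc? = index_unique_strings_alt l mc? := by
  unfold index_unique_strings index_unique_strings_alt
  dsimp only
  have hthr : pvThreshold mc? = pvMc mc? := by
    cases mc? with
    | none => rfl
    | some m => by_cases h : m = 0 <;> simp [pvThreshold, pvMc, h, Option.filter]
  rw [hthr]
  set mc := pvMc mc? with hmc
  set en := PySem.List.enumerate l 0 with hen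
  set xs := l.filter (fun s => s ≠ "") with hxs
  set S := PySem.Set.ofList xs with hS
  -- idxA k : the per-key rescan of A
  have hidx : ∀ k : String,
      (en.foldl (fun acc p => if k = p.2 then acc ++ [p.1] else acc) ([] : List Int))
        = (en.filter (fun p => decide (k = p.2))).map (·.1) := by
    intro k
    simpa using PySem.List.foldl_append_ite (p := fun p => k = p.2) (f := fun p => p.1) en []
  -- A's key list
  have hkeysA : ((PySem.Dict.counter xs).items.filter (fun p => mc ≤ p.2)).map (·.1)
      = S.filter (fun k => decide (mc ≤ ((xs.count k : Nat) : Int))) := by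
    rw [PySem.Dict.items_counter, List.filter_map, List.map_map, ← hS]
    simp [Function.comp_def]
  -- A's items
  have hA : ((((PySem.Dict.counter xs).items.filter (fun p => mc ≤ p.2)).map (·.1)).foldl
        (fun out key => out.insert key
          (en.foldl (fun acc p => if key = p.2 then acc ++ [p.1] else acc) [])) PySem.Dict.empty).items
      = (S.filter (fun k => decide (mc ≤ ((xs.count k : Nat) : Int)))).map
          (fun k => (k, (en.filter (fun p => decide (k = p.2))).map (·.1))) := by
    rw [hkeysA]
    have hnd : (S.filter (fun k => decide (mc ≤ ((xs.count k : Nat) : Int)))).Nodup :=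
      (PySem.Set.nodup_ofList xs).filter _
    have := PySem.Dict.items_foldl_insert_fresh
      (l := S.filter (fun k => decide (mc ≤ ((xs.count k : Nat) : Int))))
      (k := fun k => k)
      (v := fun k => en.foldl (fun acc p => if k = p.2 then acc ++ [p.1] else acc) [])
      (d := PySem.Dict.empty) (by simp) (by simpa using hnd)
    rw [this]
    simp only [PySem.Dict.empty, List.nil_append]
    exact List.map_congr_left (fun k _ => by rw [hidx k])
  rw [hA]
  -- B side
  have hfold : (en.foldl (fun d p => if p.2 ≠ "" then d.modify p.2 [] (· ++ [p.1]) else d)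
        PySem.Dict.empty)
      = (en.filter (fun p => decide (p.2 ≠ ""))).foldl
          (fun d p => d.modify p.2 ([] : List Int) (· ++ [p.1])) PySem.Dict.empty := by
    exact PySem.List.foldl_ite_eq_foldl_filter (p := fun q : Int × String => q.2 ≠ "")
      (f := fun d q => d.modify q.2 ([] : List Int) (· ++ [q.1])) en PySem.Dict.empty
  set enq := en.filter (fun p => decide (p.2 ≠ "")) with henq
  set positions := enq.foldl (fun d p => d.modify p.2 ([] : List Int) (· ++ [p.1])) PySem.Dict.empty with hpos
  have hsnd : enq.map (·.2) = xs := by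
    rw [henq, hxs, ← PySem.List.map_snd_enumerate l 0, ← hen, List.filter_map]
    rfl
  have hkeysB : positions.keys = S := by
    rw [hpos]
    have := PySem.Dict.keys_foldl_modify_key (l := enq) (key := fun p => p.2)
      (d0 := ([] : List Int)) (f := fun _ p v => v ++ [p.1]) (d := PySem.Dict.empty)
    rw [this, hsnd]
    rw [hS, PySem.Set.ofList_eq_foldl]
    rfl
  have hnodB : positions.keys.Nodup := by
    rw [hpos]
    exact PySem.Dict.nodup_keys_foldl_modify_key enq (fun p => p.2) _ _ _ (by simp)
  have hgetD : ∀ c, positions.getD c [] = (enq.filter (fun p => p.2 == c)).map (·.1) := by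
    intro c
    rw [hpos]
    have h1 : enq.foldl (fun d p => d.modify p.2 ([] : List Int) (· ++ [p.1])) PySem.Dict.empty
        = ((enq.map (fun p => (p.2, p.1))).foldl (fun d p => d.modify p.1 ([] : List Int) (· ++ [p.2])) PySem.Dict.empty) := by
      rw [List.foldl_map]
    rw [h1, PySem.Dict.getD_foldl_modify_append, List.filter_map]
    simp [List.map_map]
    rfl
  have hitems : positions.items = S.map (fun k => (k, positions.getD k [])) := by
    rw [← hkeysB]; exact PySem.Dict.items_eq_map_keys positions hnodB []
  rw [hfold, hitems, List.filter_map]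
  -- now both sides are maps over filters of S
  -- pointwise facts for k ∈ S (k ≠ "")
  have hkne : ∀ k ∈ S, k ≠ "" := by
    intro k hk
    rw [hS] at hk
    have := (PySem.Set.mem_ofList xs k).mp hk
    rw [hxs] at this
    exact (List.mem_filter.mp this).2 |> fun h => by simpa using h
  have hval : ∀ k ∈ S, positions.getD k [] = (en.filter (fun p => decide (k = p.2))).map (·.1) := by
    intro k hk
    rw [hgetD, henq, List.filter_filter]
    congr 1
    apply List.filter_congr
    intro p _
    by_cases h : p.2 = k
    · simp [h, hkne k hk]
    · simp [h, Ne.symm h]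
  have hlen : ∀ k ∈ S, ((positions.getD k []).length : Int) = ((xs.count k : Nat) : Int) := by
    intro k hk
    rw [hval k hk]
    have h2 : (en.filter (fun p => decide (k = p.2))).length = l.count k := by
      rw [← List.countP_eq_length_filter (p := fun p : Int × String => decide (k = p.2)),
        show (fun p : Int × String => decide (k = p.2))
          = ((fun s => decide (k = s)) ∘ (fun p : Int × String => p.2)) from rfl,
        ← List.countP_map, hen, PySem.List.map_snd_enumerate, List.count]
      refine List.countP_congr (fun s _ => ?_)
      by_cases h : k = s
      · simp [h]
      · simp [h, Ne.symm h]
    have h3 : xs.count k = l.count k := by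
      rw [hxs]; exact List.count_filter (by simpa using hkne k hk)
    simp [h2, h3]
  -- finish: equal filters, equal maps
  have hfe : S.filter ((fun p : String × List Int => decide (mc ≤ (p.2.length : Int))) ∘ (fun k => (k, positions.getD k [])))
      = S.filter (fun k => decide (mc ≤ ((xs.count k : Nat) : Int))) := by
    apply List.filter_congr
    intro k hk
    simp only [Function.comp]
    rw [hlen k hk]
  rw [hfe]
  apply List.map_congr_left
  intro k hk
  have hkS : k ∈ S := List.mem_of_mem_filter hk
  rw [hval k hkS]

-- ===== VERDICT (by name: the statement is the Claim_ definition above) =====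
theorem index_unique_strings_spec : Claim_equal_index_unique_strings := by
  intro input_list min_count _ _
  unfold Spec_index_unique_strings
  exact pv_AB_eq input_list min_count
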